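-- pv_equiv track=rewrite | github.com/DolevMishali/CsharpMission | 04. PyhonTask/CheckSortedArrays.py | find_sum_in_sorted_arrays
-- ===== SOURCE A (Python) =====
-- def find_sum_in_sorted_arrays(arr1, arr2, target_sum):
--
--     # Initialize two pointers: i for arr1 pointing to the start, j for arr2 pointing to the end
--     i = 0
--     j = len(arr2) - 1
--
--     # Loop through the arrays while i is less than the length of arr1 and j is greater than or equal to 0
--     while i < len(arr1) and j >= 0:
--         current_sum = arr1[i] + arr2[j]
--
--         # If current_sum is equal to target_sum, we found the sum we're looking for, return True
--         if current_sum == target_sum: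
--             return True
--
--          # If current_sum is less than target_sum, we need a larger sum, increment i to increase the sum
--         elif current_sum < target_sum:
--             i += 1
--
--         # If current_sum is greater than target_sum, we need a smaller sum, decrement j to decrease the sum
--         else:
--             j -= 1
--     return False
-- ===== SOURCE B (Python) =====
-- def find_sum_in_sorted_arrays(arr1, arr2, target_sum):
--     seen = set(arr1)
--     return any(target_sum - x in seen for x in arr2)
-- ===== Notes on version B (the rewrite author's own statement) =====
-- stated objective: idiomatic
-- what changed: Replaces the two-pointer convergence over both sorted arrays with a hash-set of arr1's elements and a single complement-lookup pass over arr2; Pre_ keeps the natural sorted domain plus all inputs with no matching pair, and excludes unsorted inputs containing a pair, where A can miss it.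
-- outside the precondition, e.g. on find_sum_in_sorted_arrays([3, 1], [2], 3): A returns False, B returns True
import Mathlib
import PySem

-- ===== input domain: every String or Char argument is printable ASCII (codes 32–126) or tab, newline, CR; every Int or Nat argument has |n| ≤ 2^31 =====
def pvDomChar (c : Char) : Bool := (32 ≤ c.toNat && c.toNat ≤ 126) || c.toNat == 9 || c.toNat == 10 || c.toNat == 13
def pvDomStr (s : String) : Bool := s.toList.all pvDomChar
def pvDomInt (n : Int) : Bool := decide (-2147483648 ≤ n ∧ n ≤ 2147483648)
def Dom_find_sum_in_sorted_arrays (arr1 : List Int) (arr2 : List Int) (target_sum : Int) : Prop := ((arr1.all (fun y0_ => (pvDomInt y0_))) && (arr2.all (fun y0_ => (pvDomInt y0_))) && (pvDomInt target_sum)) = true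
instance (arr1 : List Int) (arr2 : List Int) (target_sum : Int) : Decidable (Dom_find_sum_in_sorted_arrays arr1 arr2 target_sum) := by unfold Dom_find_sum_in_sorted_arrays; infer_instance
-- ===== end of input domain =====

-- B replaces A's two-pointer convergence with a hash-set of arr1 plus one complement-lookup pass
-- over arr2 (idiomatic, same cost); equivalence is claimed on the function's natural domain
-- (both arrays nondecreasing), stated in Pre_.


-- ===== PORT A =====
-- the while-loop of A, with the same two integer pointers i (start of arr1) and j (end of arr2)
def pvLoopA (arr1 : List Int) (arr2 : List Int) (t : Int) (i j : Int) : Bool :=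
  if h : i < (arr1.length : Int) ∧ 0 ≤ j then
    let current_sum := (PySem.List.pyGet? arr1 i).getD 0 + (PySem.List.pyGet? arr2 j).getD 0
    if current_sum = t then true
    else if current_sum < t then pvLoopA arr1 arr2 t (i + 1) j
    else pvLoopA arr1 arr2 t i (j - 1)
  else false
termination_by ((arr1.length : Int) - i + (j + 1)).toNat
decreasing_by all_goals omega

def find_sum_in_sorted_arrays (arr1 : List Int) (arr2 : List Int) (target_sum : Int) : Bool :=
  pvLoopA arr1 arr2 target_sum 0 ((arr2.length : Int) - 1)

-- ===== PORT B =====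
def find_sum_in_sorted_arrays_alt (arr1 : List Int) (arr2 : List Int) (target_sum : Int) : Bool :=
  let seen : PySem.Set Int := PySem.Set.ofList arr1
  arr2.any (fun x => PySem.Set.contains seen (target_sum - x))

-- ===== PRECONDITION & SPEC =====
-- Pre_ admits the function's natural domain (both arrays nondecreasing) and additionally every
-- input without any pair summing to the target (there both versions return False for the same
-- trivial reason); it excludes unsorted inputs that do contain a matching pair, where A's
-- two-pointer walk can silently miss the pair (see the cite in the claim).
def Pre_find_sum_in_sorted_arrays (arr1 : List Int) (arr2 : List Int) (target_sum : Int) : Prop :=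
  (arr1.Pairwise (· ≤ ·) ∧ arr2.Pairwise (· ≤ ·)) ∨
    (∀ a ∈ arr1, ∀ b ∈ arr2, a + b ≠ target_sum)
instance (arr1 : List Int) (arr2 : List Int) (target_sum : Int) : Decidable (Pre_find_sum_in_sorted_arrays arr1 arr2 target_sum) := by unfold Pre_find_sum_in_sorted_arrays; infer_instance

def pvWitness_find_sum_in_sorted_arrays : List Int × List Int × Int := ([1, 2], [3, 4], 5)

def Spec_find_sum_in_sorted_arrays (arr1 : List Int) (arr2 : List Int) (target_sum : Int) (out : Bool) : Prop := out = find_sum_in_sorted_arrays_alt arr1 arr2 target_sum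
instance (arr1 : List Int) (arr2 : List Int) (target_sum : Int) (out : Bool) : Decidable (Spec_find_sum_in_sorted_arrays arr1 arr2 target_sum out) := by unfold Spec_find_sum_in_sorted_arrays; infer_instance

-- ===== CLAIM (what is proved, stated in full; the proofs are below) =====
def Claim_equal_find_sum_in_sorted_arrays : Prop := ∀ (arr1 : List Int) (arr2 : List Int) (target_sum : Int), Dom_find_sum_in_sorted_arrays arr1 arr2 target_sum → Pre_find_sum_in_sorted_arrays arr1 arr2 target_sum → Spec_find_sum_in_sorted_arrays arr1 arr2 target_sum (find_sum_in_sorted_arrays arr1 arr2 target_sum)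

-- ===== LEMMAS AND PROOFS =====

lemma pvGetD_eq (xs : List Int) (i : Int) (h0 : 0 ≤ i) :
    (PySem.List.pyGet? xs i).getD 0 = xs.getD i.toNat 0 := by
  rw [PySem.List.pyGet?_of_nonneg xs h0,
    List.getD_eq_getElem?_getD]

lemma sorted_getD {xs : List Int} (h : xs.Pairwise (· ≤ ·)) {a b : Nat}
    (hab : a ≤ b) (hb : b < xs.length) : xs.getD a 0 ≤ xs.getD b 0 := by
  rcases Nat.lt_or_ge a b with hlt | hge
  · rw [List.getD_eq_getElem xs 0 (by omega), List.getD_eq_getElem xs 0 hb]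
    exact List.pairwise_iff_getElem.mp h a b (by omega) hb hlt
  · have : a = b := by omega
    subst this; exact le_refl _

-- characterisation of A's loop on sorted arrays
lemma pvLoopA_iff (arr1 arr2 : List Int) (t : Int)
    (h1 : arr1.Pairwise (· ≤ ·)) (h2 : arr2.Pairwise (· ≤ ·))
    (i j : Int) (hi : 0 ≤ i) (hj : j < (arr2.length : Int)) :
    pvLoopA arr1 arr2 t i j = true ↔
      ∃ k : Nat, k < arr1.length ∧ i ≤ (k : Int) ∧
        ∃ l : Nat, l < arr2.length ∧ (l : Int) ≤ j ∧ arr1.getD k 0 + arr2.getD l 0 = t := by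
  fun_induction pvLoopA arr1 arr2 t i j with
  | case1 i j h current_sum heq =>
    simp only [true_iff]
    have heq' : (PySem.List.pyGet? arr1 i).getD 0 + (PySem.List.pyGet? arr2 j).getD 0 = t := heq
    refine ⟨i.toNat, by omega, by omega, j.toNat, by omega, by omega, ?_⟩
    rw [← pvGetD_eq arr1 i hi, ← pvGetD_eq arr2 j h.2]
    exact heq'
  | case2 i j h current_sum hne hlt ih =>
    rw [ih (by omega) hj]
    have e1 : (PySem.List.pyGet? arr1 i).getD 0 = arr1.getD i.toNat 0 := pvGetD_eq arr1 i hi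
    have e2 : (PySem.List.pyGet? arr2 j).getD 0 = arr2.getD j.toNat 0 := pvGetD_eq arr2 j h.2
    have hlt' : (PySem.List.pyGet? arr1 i).getD 0 + (PySem.List.pyGet? arr2 j).getD 0 < t := hlt
    rw [e1, e2] at hlt'
    constructor
    · rintro ⟨k, hk, hik, l, hl, hlj, hsum⟩
      exact ⟨k, hk, by linarith, l, hl, hlj, hsum⟩
    · rintro ⟨k, hk, hik, l, hl, hlj, hsum⟩
      refine ⟨k, hk, ?_, l, hl, hlj, hsum⟩
      -- k = i is impossible: the sum there would be < t (arr2 is sorted)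
      by_contra hcon
      have hki : (k : Int) = i := le_antisymm (by linarith) hik
      have htn : i.toNat = k := by rw [← hki, Int.toNat_natCast]
      rw [← htn] at hsum
      have h2le : arr2.getD l 0 ≤ arr2.getD j.toNat 0 :=
        sorted_getD h2 ((Int.le_toNat h.2).mpr hlj) (by omega)
      linarith
  | case3 i j h current_sum hne hnlt ih =>
    rw [ih hi (by omega)]
    have e1 : (PySem.List.pyGet? arr1 i).getD 0 = arr1.getD i.toNat 0 := pvGetD_eq arr1 i hi
    have e2 : (PySem.List.pyGet? arr2 j).getD 0 = arr2.getD j.toNat 0 := pvGetD_eq arr2 j h.2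
    have hge : t ≤ (PySem.List.pyGet? arr1 i).getD 0 + (PySem.List.pyGet? arr2 j).getD 0 :=
      le_of_not_gt hnlt
    have hgt : t < arr1.getD i.toNat 0 + arr2.getD j.toNat 0 := by
      rw [e1, e2] at hge
      rcases lt_or_eq_of_le hge with hx | hx
      · exact hx
      · exact absurd (by rw [← e1, ← e2] at hx; exact hx.symm) hne
    constructor
    · rintro ⟨k, hk, hik, l, hl, hlj, hsum⟩
      exact ⟨k, hk, hik, l, hl, by linarith, hsum⟩
    · rintro ⟨k, hk, hik, l, hl, hlj, hsum⟩
      refine ⟨k, hk, hik, l, hl, ?_, hsum⟩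
      -- l = j is impossible: the sum there would be > t (arr1 is sorted)
      by_contra hcon
      have hlj' : (l : Int) = j := le_antisymm hlj (by linarith)
      have htn : j.toNat = l := by rw [← hlj', Int.toNat_natCast]
      rw [← htn] at hsum
      have h1le : arr1.getD i.toNat 0 ≤ arr1.getD k 0 :=
        sorted_getD h1 (Int.toNat_le.mpr hik) hk
      linarith
  | case4 i j h =>
    constructor
    · intro hx; exact absurd hx (by simp)
    · rintro ⟨k, hk, hik, l, hl, hlj, hsum⟩
      exfalso
      rcases not_and_or.mp h with hA | hB
      · exact hA (lt_of_le_of_lt hik (by exact_mod_cast hk))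
      · exact hB (le_trans (Int.natCast_nonneg l) hlj)

-- if A's loop ever returns true it really saw a pair summing to t (no sortedness needed)
lemma pvLoopA_true_pair (arr1 arr2 : List Int) (t : Int) (i j : Int)
    (hi : 0 ≤ i) (hj : j < (arr2.length : Int)) :
    pvLoopA arr1 arr2 t i j = true → ∃ a ∈ arr1, ∃ b ∈ arr2, a + b = t := by
  fun_induction pvLoopA arr1 arr2 t i j with
  | case1 i j h current_sum heq =>
    intro _
    have b1 : i.toNat < arr1.length := by omega
    have b2 : j.toNat < arr2.length := by omega
    have heq' : (PySem.List.pyGet? arr1 i).getD 0 + (PySem.List.pyGet? arr2 j).getD 0 = t := heq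
    have g1 : (PySem.List.pyGet? arr1 i).getD 0 = arr1.getD i.toNat 0 := pvGetD_eq arr1 i hi
    have g2 : (PySem.List.pyGet? arr2 j).getD 0 = arr2.getD j.toNat 0 := pvGetD_eq arr2 j h.2
    refine ⟨arr1[i.toNat], List.getElem_mem b1, arr2[j.toNat], List.getElem_mem b2, ?_⟩
    rw [g1, g2, List.getD_eq_getElem arr1 0 b1, List.getD_eq_getElem arr2 0 b2] at heq'
    exact heq'
  | case2 i j h current_sum hne hlt ih => exact ih (by omega) hj
  | case3 i j h current_sum hne hnlt ih => exact ih hi (by omega)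
  | case4 i j h => simp_all

-- characterisation of B
lemma alt_iff (arr1 arr2 : List Int) (t : Int) :
    find_sum_in_sorted_arrays_alt arr1 arr2 t = true ↔
      ∃ k : Nat, k < arr1.length ∧
        ∃ l : Nat, l < arr2.length ∧ arr1.getD k 0 + arr2.getD l 0 = t := by
  unfold find_sum_in_sorted_arrays_alt
  rw [List.any_eq_true]
  constructor
  · rintro ⟨x, hx, hc⟩
    rw [PySem.Set.contains_iff, PySem.Set.mem_ofList] at hc
    obtain ⟨k, hk, hka⟩ := List.mem_iff_getElem.mp hc
    obtain ⟨l, hl, hla⟩ := List.mem_iff_getElem.mp hx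
    refine ⟨k, hk, l, hl, ?_⟩
    rw [List.getD_eq_getElem arr1 0 hk, List.getD_eq_getElem arr2 0 hl, hka, hla]
    omega
  · rintro ⟨k, hk, l, hl, hsum⟩
    refine ⟨arr2[l], List.getElem_mem hl, ?_⟩
    rw [PySem.Set.contains_iff, PySem.Set.mem_ofList]
    have : t - arr2[l] = arr1[k] := by
      rw [List.getD_eq_getElem arr1 0 hk, List.getD_eq_getElem arr2 0 hl] at hsum
      omega
    rw [this]
    exact List.getElem_mem hk

-- ===== VERDICT (by name: the statement is the Claim_ definition above) =====
theorem find_sum_in_sorted_arrays_spec : Claim_equal_find_sum_in_sorted_arrays := by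
  intro arr1 arr2 t _ hpre
  unfold Spec_find_sum_in_sorted_arrays find_sum_in_sorted_arrays
  rcases hpre with ⟨s1, s2⟩ | hnp
  · rw [Bool.eq_iff_iff,
      pvLoopA_iff arr1 arr2 t s1 s2 0 ((arr2.length : Int) - 1) le_rfl (by omega),
      alt_iff]
    constructor
    · rintro ⟨k, hk, _, l, hl, _, hsum⟩; exact ⟨k, hk, l, hl, hsum⟩
    · rintro ⟨k, hk, l, hl, hsum⟩; exact ⟨k, hk, by omega, l, hl, by omega, hsum⟩
  · rw [Bool.eq_iff_iff]
    constructor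
    · intro hA
      obtain ⟨a, ha, b, hb, hab⟩ := pvLoopA_true_pair arr1 arr2 t 0 ((arr2.length : Int) - 1) le_rfl (by omega) hA
      exact absurd hab (hnp a ha b hb)
    · intro hB
      rw [alt_iff] at hB
      obtain ⟨k, hk, l, hl, hsum⟩ := hB
      rw [List.getD_eq_getElem arr1 0 hk, List.getD_eq_getElem arr2 0 hl] at hsum
      exact absurd hsum (hnp _ (List.getElem_mem hk) _ (List.getElem_mem hl))
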